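-- pv_equiv track=rewrite | github.com/vishhaware/Predictive-Scrap-Ai | backend_fastapi/main.py | _machine_match_candidates
-- ===== SOURCE A (Python) =====
-- from typing import Any, Dict, List, Optional, Tuple
--
-- MACHINE_IDS = ["M231-11", "M356-57", "M471-23", "M607-30", "M612-33"]
--
-- def _normalize_machine_query(value: Any) -> str:
--     if value is None:
--         return ""
--     # Accept lowercase, spacing, and underscore variants from clients.
--     return str(value).strip().lower().replace("_", "-").replace(" ", "")
--
-- def _machine_match_candidates(machine_id: Any) -> List[str]:
--     query = _normalize_machine_query(machine_id)
--     if not query: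
--         return []
--
--     normalized_ids = {
--         mid: _normalize_machine_query(mid) for mid in MACHINE_IDS
--     }
--
--     exact = [mid for mid, norm in normalized_ids.items() if norm == query]
--     if exact:
--         return exact
--
--     starts_with = [mid for mid, norm in normalized_ids.items() if norm.startswith(query)]
--     if starts_with:
--         return starts_with
--
--     contains = [mid for mid, norm in normalized_ids.items() if query in norm]
--     return contains
-- ===== SOURCE B (Python) =====
-- MACHINE_IDS = ["M231-11", "M356-57", "M471-23", "M607-30", "M612-33"]
--
-- def _normalize_machine_query(value):
--     if value is None:
--         return ""
--     return str(value).strip().lower().replace("_", "-").replace(" ", "")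
--
-- def _match_tier(query, norm):
--     # rank of the match: 0 exact, 1 prefix, 2 substring, 3 no match
--     if norm == query:
--         return 0
--     if norm.startswith(query):
--         return 1
--     if query in norm:
--         return 2
--     return 3
--
-- def _machine_match_candidates(machine_id):
--     query = _normalize_machine_query(machine_id)
--     if not query:
--         return []
--     scored = [(mid, _match_tier(query, _normalize_machine_query(mid)))
--               for mid in MACHINE_IDS]
--     best = min(s for _, s in scored)
--     if best == 3:
--         return []
--     return [mid for mid, s in scored if s == best]
-- ===== Notes on version B (the rewrite author's own statement) =====
-- stated objective: alternative
-- what changed: Replaces A's staged filters with early returns (exact, then prefix, then substring, each a separate comprehension over a normalized-id dict) by a score-and-argmin algorithm: each id gets a single numeric match tier (0 exact, 1 prefix, 2 substring, 3 none), the minimum tier is computed, and the ids achieving it are returned.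
import Mathlib
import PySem

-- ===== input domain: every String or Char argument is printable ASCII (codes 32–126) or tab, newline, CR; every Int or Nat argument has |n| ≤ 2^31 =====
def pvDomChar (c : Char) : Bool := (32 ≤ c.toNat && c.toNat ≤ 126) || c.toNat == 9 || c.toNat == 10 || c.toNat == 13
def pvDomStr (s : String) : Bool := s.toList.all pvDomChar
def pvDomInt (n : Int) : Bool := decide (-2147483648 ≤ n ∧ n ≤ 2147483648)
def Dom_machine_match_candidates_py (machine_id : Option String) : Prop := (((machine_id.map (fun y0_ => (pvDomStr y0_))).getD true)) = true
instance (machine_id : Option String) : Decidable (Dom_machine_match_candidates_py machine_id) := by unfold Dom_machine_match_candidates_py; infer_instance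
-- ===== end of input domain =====

-- B replaces A's staged exact/prefix/substring filters with early returns by a score-and-argmin
-- algorithm: each id gets one numeric tier (0/1/2/3), the minimum tier is selected (alternative).

-- ===== PORT A =====
def MACHINE_IDS : List String := ["M231-11", "M356-57", "M471-23", "M607-30", "M612-33"]

-- shared helper: both Pythons define the identical _normalize_machine_query
def normalize_machine_query (value : Option String) : String :=
  match value with
  | none => ""
  | some s =>
      PySem.Str.replace (PySem.Str.replace (PySem.Str.lower (PySem.Str.strip s)) "_" "-") " " ""

def machine_match_candidates_py (machine_id : Option String) : List String :=
  let query := normalize_machine_query machine_id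
  if query.toList = [] then []
  else
    let normalized_ids : PySem.Dict String String :=
      MACHINE_IDS.foldl (fun d mid => d.insert mid (normalize_machine_query (some mid))) PySem.Dict.empty
    let exact := (normalized_ids.items.filter (fun p => p.2 == query)).map Prod.fst
    if exact ≠ [] then exact
    else
      let starts_with := (normalized_ids.items.filter (fun p => PySem.Str.startswith p.2 query)).map Prod.fst
      if starts_with ≠ [] then starts_with
      else (normalized_ids.items.filter (fun p => PySem.Str.isIn query p.2)).map Prod.fst

-- ===== PORT B =====
-- rank of the match: 0 exact, 1 prefix, 2 substring, 3 no match
def match_tier (query norm : String) : Int :=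
  if norm == query then 0
  else if PySem.Str.startswith norm query then 1
  else if PySem.Str.isIn query norm then 2
  else 3

def machine_match_candidates_py_alt (machine_id : Option String) : List String :=
  let query := normalize_machine_query machine_id
  if query.toList = [] then []
  else
    let scored := MACHINE_IDS.map
      (fun mid => (mid, match_tier query (normalize_machine_query (some mid))))
    match PySem.List.min? (scored.map Prod.snd) (fun s => s) with
    | none => []   -- unreachable: MACHINE_IDS is nonempty (min of an empty generator would raise)
    | some best =>
        if best == 3 then []
        else (scored.filter (fun p => p.2 == best)).map Prod.fst

-- ===== PRECONDITION & SPEC =====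
def Spec_machine_match_candidates_py (machine_id : Option String) (out : List String) : Prop := out = machine_match_candidates_py_alt machine_id
instance (machine_id : Option String) (out : List String) : Decidable (Spec_machine_match_candidates_py machine_id out) := by unfold Spec_machine_match_candidates_py; infer_instance

-- ===== CLAIM (what is proved, stated in full; the proofs are below) =====
def Claim_equal_machine_match_candidates_py : Prop := ∀ (machine_id : Option String), Dom_machine_match_candidates_py machine_id → Spec_machine_match_candidates_py machine_id (machine_match_candidates_py machine_id)

-- ===== LEMMAS AND PROOFS =====

-- filter-then-project over the (id, norm) pairs is a plain filter of the id list.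
theorem filter_map_pairs {β : Type} (l : List String) (f : String → β) (P : String × β → Bool) :
    ((l.map (fun m => (m, f m))).filter P).map Prod.fst
      = l.filter (fun m => P (m, f m)) := by
  induction l with
  | nil => rfl
  | cons m l ih => by_cases h : P (m, f m) <;> simp [h, ih]

-- tier values and their characterizations
theorem tier_mem (q n : String) : match_tier q n = 0 ∨ match_tier q n = 1 ∨
    match_tier q n = 2 ∨ match_tier q n = 3 := by
  unfold match_tier; split_ifs <;> simp

theorem tier_eq_zero_iff (q n : String) : match_tier q n = 0 ↔ (n == q) = true := by
  unfold match_tier; split_ifs with h1 h2 h3 <;> simp_all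

theorem tier_eq_one_iff (q n : String) (h : ¬ (n == q) = true) :
    match_tier q n = 1 ↔ PySem.Str.startswith n q = true := by
  unfold match_tier; split_ifs with h1 h2 h3 <;> simp_all

theorem tier_eq_two_iff (q n : String) (h : ¬ (n == q) = true)
    (h' : ¬ PySem.Str.startswith n q = true) :
    match_tier q n = 2 ↔ PySem.Str.isIn q n = true := by
  unfold match_tier; split_ifs with h1 h2 h3 <;> simp_all

-- core: staged filters with early returns = score-and-argmin, over any id list
theorem staged_eq_argmin (l : List String) (q : String) :
    (if l.filter (fun m => normalize_machine_query (some m) == q) ≠ [] then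
       l.filter (fun m => normalize_machine_query (some m) == q)
     else if l.filter (fun m => PySem.Str.startswith (normalize_machine_query (some m)) q) ≠ [] then
       l.filter (fun m => PySem.Str.startswith (normalize_machine_query (some m)) q)
     else l.filter (fun m => PySem.Str.isIn q (normalize_machine_query (some m))))
    = (match PySem.List.min? (l.map (fun m => match_tier q (normalize_machine_query (some m)))) (fun s => s) with
       | none => []
       | some best =>
           if best == 3 then []
           else l.filter (fun m => match_tier q (normalize_machine_query (some m)) == best)) := by
  rcases hmin : PySem.List.min? (l.map (fun m => match_tier q (normalize_machine_query (some m)))) (fun s => s) with _ | b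
  · rw [PySem.List.min?_eq_none_iff] at hmin
    simp only [List.map_eq_nil_iff] at hmin
    subst hmin; simp
  · obtain ⟨mb, hmb, hmbt0⟩ := List.mem_map.1 (PySem.List.min?_mem hmin)
    have hmbt : match_tier q (normalize_machine_query (some mb)) = b := hmbt0
    have hble : ∀ m ∈ l, b ≤ match_tier q (normalize_machine_query (some m)) := by
      intro m hm
      exact PySem.List.min?_isMin hmin _ (List.mem_map_of_mem hm)
    by_cases hE : ∃ m ∈ l, (normalize_machine_query (some m) == q) = true
    · -- best = 0, argmin filter = exact filter
      obtain ⟨m0, hm0, hm0q⟩ := hE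
      have hb0 : b = 0 := by
        have h1 : b ≤ 0 := (tier_eq_zero_iff q _).2 hm0q ▸ hble m0 hm0
        have h2 := tier_mem q (normalize_machine_query (some mb))
        omega
      subst hb0
      have hEne : l.filter (fun m => normalize_machine_query (some m) == q) ≠ [] :=
        List.ne_nil_of_mem (List.mem_filter.2 ⟨hm0, hm0q⟩)
      rw [if_pos hEne]
      show List.filter (fun m => normalize_machine_query (some m) == q) l
        = List.filter (fun m => match_tier q (normalize_machine_query (some m)) == (0 : Int)) l
      apply List.filter_congr
      intro m _
      show (normalize_machine_query (some m) == q)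
        = (match_tier q (normalize_machine_query (some m)) == (0 : Int))
      by_cases h : (normalize_machine_query (some m) == q) = true
      · rw [h, (tier_eq_zero_iff q _).2 h]; decide
      · have hne : match_tier q (normalize_machine_query (some m)) ≠ 0 := fun hc =>
          h ((tier_eq_zero_iff q _).1 hc)
        rw [Bool.eq_false_iff.mpr h, beq_eq_false_iff_ne.mpr hne]
    · push_neg at hE
      have hEq : l.filter (fun m => normalize_machine_query (some m) == q) = [] :=
        List.filter_eq_nil_iff.2 hE
      by_cases hS : ∃ m ∈ l, PySem.Str.startswith (normalize_machine_query (some m)) q = true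
      · -- best = 1
        obtain ⟨m1, hm1, hm1s⟩ := hS
        have hb1 : b = 1 := by
          have h1 : b ≤ 1 :=
            (tier_eq_one_iff q _ (hE m1 hm1)).2 hm1s ▸ hble m1 hm1
          have h2 := tier_mem q (normalize_machine_query (some mb))
          have h0 : match_tier q (normalize_machine_query (some mb)) ≠ 0 := fun hc =>
            absurd ((tier_eq_zero_iff q _).1 hc) (hE mb hmb)
          omega
        subst hb1
        have hSne : l.filter (fun m => PySem.Str.startswith (normalize_machine_query (some m)) q) ≠ [] :=
          List.ne_nil_of_mem (List.mem_filter.2 ⟨hm1, hm1s⟩)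
        rw [if_neg (not_not_intro hEq), if_pos hSne]
        show List.filter (fun m => PySem.Str.startswith (normalize_machine_query (some m)) q) l
          = List.filter (fun m => match_tier q (normalize_machine_query (some m)) == (1 : Int)) l
        apply List.filter_congr
        intro m hm
        show (PySem.Str.startswith (normalize_machine_query (some m)) q)
          = (match_tier q (normalize_machine_query (some m)) == (1 : Int))
        by_cases h : PySem.Str.startswith (normalize_machine_query (some m)) q = true
        · rw [h, (tier_eq_one_iff q _ (hE m hm)).2 h]; decide
        · have hne : match_tier q (normalize_machine_query (some m)) ≠ 1 := fun hc =>
            h ((tier_eq_one_iff q _ (hE m hm)).1 hc)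
          rw [Bool.eq_false_iff.mpr h, beq_eq_false_iff_ne.mpr hne]
      · push_neg at hS
        have hSq : l.filter (fun m => PySem.Str.startswith (normalize_machine_query (some m)) q) = [] :=
          List.filter_eq_nil_iff.2 hS
        have hge2 : ∀ m ∈ l, 2 ≤ match_tier q (normalize_machine_query (some m)) := by
          intro m hm
          have h0 : match_tier q (normalize_machine_query (some m)) ≠ 0 := fun hc =>
            absurd ((tier_eq_zero_iff q _).1 hc) (hE m hm)
          have h1 : match_tier q (normalize_machine_query (some m)) ≠ 1 := fun hc =>
            absurd ((tier_eq_one_iff q _ (hE m hm)).1 hc) (hS m hm)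
          have h2 := tier_mem q (normalize_machine_query (some m))
          omega
        by_cases hC : ∃ m ∈ l, PySem.Str.isIn q (normalize_machine_query (some m)) = true
        · -- best = 2
          obtain ⟨m2, hm2, hm2c⟩ := hC
          have hb2 : b = 2 := by
            have h1 : b ≤ 2 :=
              (tier_eq_two_iff q _ (hE m2 hm2) (hS m2 hm2)).2 hm2c ▸ hble m2 hm2
            have h2 := hge2 mb hmb
            omega
          subst hb2
          rw [if_neg (not_not_intro hEq), if_neg (not_not_intro hSq)]
          show List.filter (fun m => PySem.Str.isIn q (normalize_machine_query (some m))) l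
            = List.filter (fun m => match_tier q (normalize_machine_query (some m)) == (2 : Int)) l
          apply List.filter_congr
          intro m hm
          show (PySem.Str.isIn q (normalize_machine_query (some m)))
            = (match_tier q (normalize_machine_query (some m)) == (2 : Int))
          by_cases h : PySem.Str.isIn q (normalize_machine_query (some m)) = true
          · rw [h, (tier_eq_two_iff q _ (hE m hm) (hS m hm)).2 h]; decide
          · have hne : match_tier q (normalize_machine_query (some m)) ≠ 2 := fun hc =>
              h ((tier_eq_two_iff q _ (hE m hm) (hS m hm)).1 hc)
            rw [Bool.eq_false_iff.mpr h, beq_eq_false_iff_ne.mpr hne]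
        · push_neg at hC
          have hb3 : b = 3 := by
            have h2 : match_tier q (normalize_machine_query (some mb)) ≠ 2 := fun hc =>
              absurd ((tier_eq_two_iff q _ (hE mb hmb) (hS mb hmb)).1 hc) (hC mb hmb)
            have h3 := hge2 mb hmb
            have h4 := tier_mem q (normalize_machine_query (some mb))
            omega
          subst hb3
          have hCq : l.filter (fun m => PySem.Str.isIn q (normalize_machine_query (some m))) = [] :=
            List.filter_eq_nil_iff.2 hC
          rw [if_neg (not_not_intro hEq), if_neg (not_not_intro hSq), hCq]
          rfl

-- the unfolded bodies of the two ports (pairs form), for generic query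
theorem pairs_staged_eq (q : String) :
    (if ((MACHINE_IDS.map (fun m => (m, normalize_machine_query (some m)))).filter
          (fun p => p.2 == q)).map Prod.fst ≠ [] then
       ((MACHINE_IDS.map (fun m => (m, normalize_machine_query (some m)))).filter
          (fun p => p.2 == q)).map Prod.fst
     else if ((MACHINE_IDS.map (fun m => (m, normalize_machine_query (some m)))).filter
          (fun p => PySem.Str.startswith p.2 q)).map Prod.fst ≠ [] then
       ((MACHINE_IDS.map (fun m => (m, normalize_machine_query (some m)))).filter
          (fun p => PySem.Str.startswith p.2 q)).map Prod.fst
     else ((MACHINE_IDS.map (fun m => (m, normalize_machine_query (some m)))).filter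
          (fun p => PySem.Str.isIn q p.2)).map Prod.fst)
    = (match PySem.List.min?
          ((MACHINE_IDS.map (fun mid => (mid, match_tier q (normalize_machine_query (some mid))))).map Prod.snd)
          (fun s => s) with
       | none => []
       | some best =>
           if best == 3 then []
           else ((MACHINE_IDS.map (fun mid => (mid, match_tier q (normalize_machine_query (some mid))))).filter
                  (fun p => p.2 == best)).map Prod.fst) := by
  rw [filter_map_pairs, filter_map_pairs, filter_map_pairs, List.map_map]
  simp only [Function.comp_def]
  rcases h : PySem.List.min? (MACHINE_IDS.map (fun m => match_tier q (normalize_machine_query (some m)))) (fun s => s) with _ | b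
  · have := staged_eq_argmin MACHINE_IDS q
    rw [h] at this; exact this
  · have := staged_eq_argmin MACHINE_IDS q
    rw [h] at this
    rw [this]
    show (if (b == 3) = true then []
          else MACHINE_IDS.filter (fun m => match_tier q (normalize_machine_query (some m)) == b))
       = (if (b == 3) = true then []
          else ((MACHINE_IDS.map (fun mid => (mid, match_tier q (normalize_machine_query (some mid))))).filter
                  (fun p => p.2 == b)).map Prod.fst)
    by_cases hb : (b == (3 : Int)) = true
    · rw [if_pos hb, if_pos hb]
    · rw [if_neg hb, if_neg hb, filter_map_pairs]

-- ===== VERDICT (by name: the statement is the Claim_ definition above) =====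
set_option maxHeartbeats 1000000 in
theorem machine_match_candidates_py_spec : Claim_equal_machine_match_candidates_py := by
  intro machine_id _
  unfold Spec_machine_match_candidates_py machine_match_candidates_py machine_match_candidates_py_alt
  by_cases hq : (normalize_machine_query machine_id).toList = []
  · simp [hq]
  · rw [if_neg hq, if_neg hq]
    exact pairs_staged_eq (normalize_machine_query machine_id)
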